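-- pv_equiv track=rewrite | github.com/AeryAdunwit/Frieght | backend/app/services/chat_support_service.py | tokenize_thaiish
-- ===== SOURCE A (Python) =====
-- def tokenize_thaiish(text: str) -> list[str]:
--     cleaned = (
--         (text or "")
--         .lower()
--         .replace("?", " ")
--         .replace(",", " ")
--         .replace("/", " ")
--         .replace("-", " ")
--         .replace("_", " ")
--         .replace("(", " ")
--         .replace(")", " ")
--     )
--     return [token.strip() for token in cleaned.split() if token.strip()]
-- ===== SOURCE B (Python) =====
-- def tokenize_thaiish(text: str) -> list[str]:
--     s = (text or "").lower()
--     delims = {"?", ",", "/", "-", "_", "(", ")"}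
--     tokens = []
--     buf = ""
--     for ch in s:
--         if ch in delims or ch.isspace():
--             if buf:
--                 tokens.append(buf)
--                 buf = ""
--         else:
--             buf += ch
--     if buf:
--         tokens.append(buf)
--     return tokens
-- ===== Notes on version B (the rewrite author's own statement) =====
-- stated objective: alternative
-- what changed: Replaces the eight-pass pipeline (seven .replace() string rewrites plus .split() plus a strip/filter comprehension) with a single character-by-character scan that maintains a token buffer and flushes it at delimiter characters and whitespace.
import Mathlib
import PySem

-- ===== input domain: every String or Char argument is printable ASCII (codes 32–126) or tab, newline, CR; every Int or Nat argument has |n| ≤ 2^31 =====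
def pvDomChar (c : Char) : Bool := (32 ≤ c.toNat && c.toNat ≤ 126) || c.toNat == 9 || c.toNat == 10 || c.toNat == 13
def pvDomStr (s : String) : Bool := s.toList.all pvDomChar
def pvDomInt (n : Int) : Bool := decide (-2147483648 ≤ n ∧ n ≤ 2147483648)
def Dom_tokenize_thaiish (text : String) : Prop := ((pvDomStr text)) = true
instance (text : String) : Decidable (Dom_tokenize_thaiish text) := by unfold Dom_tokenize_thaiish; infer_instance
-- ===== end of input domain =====

-- B replaces A's eight-pass pipeline (seven .replace() rewrites + .split() + strip/filter
-- comprehension) with a single character scan keeping a token buffer (an alternative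
-- one-pass decomposition; no speed claim); return values proved equal on Dom.

-- ===== PORT A =====
-- literal port of A: lower, seven single-char replaces, split(), then the comprehension
-- [token.strip() for token in … if token.strip()] as filter (truthy strip) + map strip.
-- ('text or ""' is the identity on str inputs: it returns text unless text == "", where it
-- returns "" = text.)
def tokenize_thaiish (text : String) : List String :=
  let cleaned :=
    PySem.Str.replace (PySem.Str.replace (PySem.Str.replace (PySem.Str.replace
      (PySem.Str.replace (PySem.Str.replace (PySem.Str.replace
        (PySem.Str.lower text) "?" " ") "," " ") "/" " ") "-" " ") "_" " ") "(" " ") ")" " "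
  ((PySem.Str.split₀ cleaned).filter (fun t => PySem.Str.strip t ≠ "")).map PySem.Str.strip

-- ===== PORT B =====
-- delimiter test of Source B: ch in {'?', ',', '/', '-', '_', '(', ')'} or ch.isspace()
def pvDelim (c : Char) : Bool :=
  ['?', ',', '/', '-', '_', '(', ')'].contains c || PySem.Chars.isspace c

-- literal port of B: one fold over the lowered characters with (tokens, buffer) state,
-- flushing the buffer at delimiters and once more after the loop.
def tokenize_thaiish_alt (text : String) : List String :=
  let s := PySem.Str.lower text
  let st := s.toList.foldl
    (fun (st : List String × String) ch =>
      if pvDelim ch then (if st.2 ≠ "" then (st.1 ++ [st.2], "") else st)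
      else (st.1, st.2.push ch)) ([], "")
  if st.2 ≠ "" then st.1 ++ [st.2] else st.1

-- ===== PRECONDITION & SPEC =====
def Spec_tokenize_thaiish (text : String) (out : List String) : Prop := out = tokenize_thaiish_alt text
instance (text : String) (out : List String) : Decidable (Spec_tokenize_thaiish text out) := by unfold Spec_tokenize_thaiish; infer_instance

-- ===== CLAIM (what is proved, stated in full; the proofs are below) =====
def Claim_equal_tokenize_thaiish : Prop := ∀ (text : String), Dom_tokenize_thaiish text → Spec_tokenize_thaiish text (tokenize_thaiish text)

-- ===== LEMMAS AND PROOFS =====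

-- the single .replace(d, " ") pass as a pointwise map
def pvRep (d n c : Char) : Char := if c = d then n else c

-- the seven replaces composed, in A's order
def pvComp : Char → Char :=
  pvRep ')' ' ' ∘ pvRep '(' ' ' ∘ pvRep '_' ' ' ∘ pvRep '-' ' ' ∘
    pvRep '/' ' ' ∘ pvRep ',' ' ' ∘ pvRep '?' ' ' 

-- reference tokenizer: split on pvDelim, buffer kept in forward order
def pvTok : List Char → List Char → List (List Char)
  | [], buf => if buf.isEmpty then [] else [buf]
  | c :: rest, buf =>
    if pvDelim c then
      (if buf.isEmpty then pvTok rest [] else buf :: pvTok rest [])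
    else pvTok rest (buf ++ [c])

theorem pvReplaceGo_single (d n : Char) :
    ∀ (l : List Char) (fuel : Nat) (acc : List Char), l.length ≤ fuel →
      PySem.Chars.replace.go [d] [n] fuel l acc
        = acc.reverse ++ l.map (pvRep d n) := by
  intro l
  induction l with
  | nil =>
    intro fuel acc _
    cases fuel <;> simp [PySem.Chars.replace.go]
  | cons c t ih =>
    intro fuel acc h
    cases fuel with
    | zero => simp at h
    | succ f =>
      simp only [List.length_cons, Nat.succ_le_succ_iff] at h
      by_cases hc : c = d
      · subst hc
        simp [PySem.Chars.replace.go, List.isPrefixOf, ih f _ h, pvRep]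
      · simp [PySem.Chars.replace.go, List.isPrefixOf, hc, ih f _ h, pvRep]
        intro h'
        exact absurd h'.symm hc

theorem pvReplace_single (l : List Char) (d n : Char) :
    PySem.Chars.replace l [d] [n] = l.map (pvRep d n) := by
  simp [PySem.Chars.replace, pvReplaceGo_single d n l l.length [] le_rfl]

theorem pvComp_of_not_mem (c : Char)
    (h : ['?', ',', '/', '-', '_', '(', ')'].contains c = false) : pvComp c = c := by
  simp only [List.contains_eq_mem, List.mem_cons, List.not_mem_nil, or_false,
    decide_eq_false_iff_not, not_or] at h
  obtain ⟨h1, h2, h3, h4, h5, h6, h7⟩ := h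
  simp [pvComp, pvRep, h1, h2, h3, h4, h5, h6, h7]

theorem pvIsspace_comp (c : Char) : PySem.Chars.isspace (pvComp c) = pvDelim c := by
  by_cases hd : ['?', ',', '/', '-', '_', '(', ')'].contains c
  · simp only [List.contains_eq_mem, List.mem_cons, List.not_mem_nil, or_false,
      decide_eq_true_eq] at hd
    rcases hd with h | h | h | h | h | h | h <;> subst h <;> decide
  · have hd' := eq_false_of_ne_true hd
    rw [pvComp_of_not_mem c hd']
    simp only [pvDelim, hd', Bool.false_or]

theorem pvComp_of_not_delim (c : Char) (h : pvDelim c = false) : pvComp c = c := by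
  apply pvComp_of_not_mem
  simp only [pvDelim, Bool.or_eq_false_iff] at h
  exact h.1

theorem pvIsspace_of_not_delim (c : Char) (h : pvDelim c = false) :
    PySem.Chars.isspace c = false := by
  simp only [pvDelim, Bool.or_eq_false_iff] at h
  exact h.2

theorem pvSplitGo_eq_tok :
    ∀ (l cur : List Char) (acc : List (List Char)),
      PySem.Chars.split₀.go (l.map pvComp) cur acc
        = acc.reverse ++ pvTok l cur.reverse := by
  intro l
  induction l with
  | nil =>
    intro cur acc
    by_cases hc : cur.isEmpty <;>
      simp [PySem.Chars.split₀.go, pvTok, hc, List.isEmpty_reverse]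
  | cons c t ih =>
    intro cur acc
    simp only [List.map_cons, PySem.Chars.split₀.go, pvIsspace_comp]
    by_cases hd : pvDelim c
    · by_cases hc : cur.isEmpty
      · have hcur : cur = [] := List.isEmpty_iff.mp hc
        simp [hd, pvTok, hcur, ih [] acc]
      · simp [hd, hc, pvTok, List.isEmpty_iff.not.mp hc,
          List.isEmpty_reverse ▸ hc, ih [] (cur.reverse :: acc), List.append_assoc]
    · rw [if_neg hd, pvComp_of_not_delim c (eq_false_of_ne_true hd)]
      have := ih (c :: cur) acc
      simp only [List.reverse_cons] at this
      simp [pvTok, hd, this]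

theorem pvTok_chars :
    ∀ (l buf : List Char), (∀ c ∈ buf, pvDelim c = false) →
      ∀ t ∈ pvTok l buf, t ≠ [] ∧ ∀ c ∈ t, pvDelim c = false := by
  intro l
  induction l with
  | nil =>
    intro buf hbuf t ht
    by_cases hb : buf.isEmpty
    · simp [pvTok, hb] at ht
    · simp [pvTok, hb] at ht
      subst ht
      exact ⟨List.isEmpty_iff.not.mp hb, hbuf⟩
  | cons c rest ih =>
    intro buf hbuf t ht
    by_cases hd : pvDelim c
    · by_cases hb : buf.isEmpty
      · simp [pvTok, hd, hb] at ht
        exact ih [] (by simp) t ht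
      · simp [pvTok, hd, hb] at ht
        rcases ht with h | h
        · subst h; exact ⟨List.isEmpty_iff.not.mp hb, hbuf⟩
        · exact ih [] (by simp) t h
    · simp only [pvTok, if_neg hd] at ht
      refine ih (buf ++ [c]) ?_ t ht
      intro x hx
      rcases List.mem_append.mp hx with h | h
      · exact hbuf x h
      · simp at h; subst h; simpa using hd

theorem pvDropWhile_all_false {p : Char → Bool} :
    ∀ (l : List Char), (∀ c ∈ l, p c = false) → l.dropWhile p = l := by
  intro l h
  cases l with
  | nil => rfl
  | cons c t => simp [List.dropWhile, h c (by simp)]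

theorem pvStrip_id (t : List Char) (h : ∀ c ∈ t, PySem.Chars.isspace c = false) :
    PySem.Chars.strip t = t := by
  unfold PySem.Chars.strip PySem.Chars.lstrip PySem.Chars.rstrip
  rw [pvDropWhile_all_false t h, pvDropWhile_all_false t.reverse (by
    intro c hc; exact h c (List.mem_reverse.mp hc))]
  simp

def pvStep (st : List String × String) (ch : Char) : List String × String :=
  if pvDelim ch then (if st.2 ≠ "" then (st.1 ++ [st.2], "") else st) else (st.1, st.2.push ch)

def pvFinish (st : List String × String) : List String :=
  if st.2 ≠ "" then st.1 ++ [st.2] else st.1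

theorem pvFoldB :
    ∀ (l : List Char) (toks : List String) (bufL : List Char),
      pvFinish (l.foldl pvStep (toks, String.ofList bufL))
        = toks ++ (pvTok l bufL).map String.ofList := by
  intro l
  induction l with
  | nil =>
    intro toks bufL
    by_cases hb : bufL = [] <;>
      simp [pvFinish, pvTok, hb, List.isEmpty_iff, String.ofList_eq_empty_iff]
  | cons c t ih =>
    intro toks bufL
    simp only [List.foldl_cons]
    by_cases hd : pvDelim c
    · by_cases hb : bufL = []
      · subst hb
        have hstep : pvStep (toks, String.ofList []) c = (toks, String.ofList []) := by
          simp [pvStep, hd]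
        rw [hstep, ih toks []]
        simp [pvTok, hd]
      · have hne : String.ofList bufL ≠ "" := by
          simpa [String.ofList_eq_empty_iff] using hb
        have hstep : pvStep (toks, String.ofList bufL) c
            = (toks ++ [String.ofList bufL], String.ofList []) := by
          simp [pvStep, hd, hne]
        rw [hstep, ih (toks ++ [String.ofList bufL]) []]
        simp [pvTok, hd, hb, List.isEmpty_iff, List.append_assoc]
    · have hstep : pvStep (toks, String.ofList bufL) c
          = (toks, String.ofList (bufL ++ [c])) := by
        have hpush : (String.ofList bufL).push c = String.ofList (bufL ++ [c]) := by
          apply String.toList_injective; simp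
        simp [pvStep, hd, hpush]
      rw [hstep, ih toks (bufL ++ [c])]
      simp [pvTok, hd]

theorem pvA_eq (text : String) :
    tokenize_thaiish text
      = (pvTok (PySem.Chars.lower text.toList) []).map String.ofList := by
  unfold tokenize_thaiish
  have hclean :
      (PySem.Str.replace (PySem.Str.replace (PySem.Str.replace (PySem.Str.replace
        (PySem.Str.replace (PySem.Str.replace (PySem.Str.replace
          (PySem.Str.lower text) "?" " ") "," " ") "/" " ") "-" " ") "_" " ") "(" " ") ")" " ").toList
        = (PySem.Chars.lower text.toList).map pvComp := by
    have e1 : ("?" : String).toList = ['?'] := rfl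
    have e2 : ("," : String).toList = [','] := rfl
    have e3 : ("/" : String).toList = ['/'] := rfl
    have e4 : ("-" : String).toList = ['-'] := rfl
    have e5 : ("_" : String).toList = ['_'] := rfl
    have e6 : ("(" : String).toList = ['('] := rfl
    have e7 : (")" : String).toList = [')'] := rfl
    have e8 : (" " : String).toList = [' '] := rfl
    simp only [PySem.Str.toList_replace, PySem.Str.toList_lower, e1, e2, e3, e4, e5, e6, e7, e8]
    simp only [pvReplace_single, List.map_map]
    rfl
  have hsplit :
      PySem.Str.split₀
          (PySem.Str.replace (PySem.Str.replace (PySem.Str.replace (PySem.Str.replace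
        (PySem.Str.replace (PySem.Str.replace (PySem.Str.replace
          (PySem.Str.lower text) "?" " ") "," " ") "/" " ") "-" " ") "_" " ") "(" " ") ")" " ")
        = (pvTok (PySem.Chars.lower text.toList) []).map String.ofList := by
    unfold PySem.Str.split₀
    rw [hclean]
    unfold PySem.Chars.split₀
    rw [pvSplitGo_eq_tok _ [] []]
    simp
  simp only [hsplit]
  have htoks := pvTok_chars (PySem.Chars.lower text.toList) [] (by simp)
  rw [List.filter_map, List.map_map]
  have hfilter : ∀ t ∈ pvTok (PySem.Chars.lower text.toList) [],
      ((fun t => decide (PySem.Str.strip t ≠ "")) ∘ String.ofList) t = true := by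
    intro t ht
    obtain ⟨hne, hchars⟩ := htoks t ht
    have hspace : ∀ c ∈ t, PySem.Chars.isspace c = false := fun c hc =>
      pvIsspace_of_not_delim c (hchars c hc)
    simp only [Function.comp_apply, decide_eq_true_eq, PySem.Str.strip]
    simp [pvStrip_id _ (by simpa using hspace), String.ofList_eq_empty_iff, hne]
  rw [List.filter_eq_self.mpr hfilter]
  refine List.map_congr_left ?_
  intro t ht
  obtain ⟨hne, hchars⟩ := htoks t ht
  have hspace : ∀ c ∈ t, PySem.Chars.isspace c = false := fun c hc =>
    pvIsspace_of_not_delim c (hchars c hc)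
  simp [PySem.Str.strip, pvStrip_id _ (by simpa using hspace)]

theorem pvB_eq (text : String) :
    tokenize_thaiish_alt text
      = (pvTok (PySem.Chars.lower text.toList) []).map String.ofList := by
  have h := pvFoldB (PySem.Str.lower text).toList [] []
  rw [show String.ofList ([] : List Char) = "" from rfl] at h
  calc tokenize_thaiish_alt text
      = [] ++ (pvTok (PySem.Str.lower text).toList []).map String.ofList := h
    _ = _ := by rw [PySem.Str.toList_lower, List.nil_append]

-- ===== VERDICT (by name: the statement is the Claim_ definition above) =====
theorem tokenize_thaiish_spec : Claim_equal_tokenize_thaiish := by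
  intro text _
  unfold Spec_tokenize_thaiish
  rw [pvA_eq, pvB_eq]
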